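-- pv_equiv track=rewrite | github.com/par0s/CompetitiveProgramming-DailyInterviewQuestions | Camp/Day 14/Last Substring in Lexicographical Order.py | lastSubstring
-- ===== SOURCE A (Python) =====
-- def lastSubstring(s: str) -> str:
--     maxL = 'a'
--     for i in s:
--         if i > maxL:
--             maxL = i
--
--     starts = set()
--     n = len(s)
--     for i in range(n):
--         if s[i] == maxL:
--             firstStart = i
--             break
--
--     secondStart = -1
--     ind = 0
--     i = firstStart + 1
--
--     while(i < n):
--         if secondStart != -1:
--             if s[secondStart + ind] > s[firstStart + ind]:
--                 firstStart = secondStart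
--                 secondStart = -1
--                 ind = 0
--                 i = firstStart + 1
--             elif s[secondStart + ind] < s[firstStart + ind]:
--                 ind = 0
--                 i = secondStart + 1
--                 secondStart = -1
--             else:
--                 ind += 1
--                 i += 1
--         elif s[i] == maxL:
--             secondStart = i
--             ind = 1
--             i += 1
--         else:
--             i += 1
--
--     return s[firstStart:]
-- ===== SOURCE B (Python) =====
-- def lastSubstring(s: str) -> str:
--     # O(n) two-pointer max-suffix (LeetCode 1163 standard technique)
--     n = len(s)
--     i, j, k = 0, 1, 0
--     while j + k < n:
--         a, b = s[i + k], s[j + k]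
--         if a == b:
--             k += 1
--         elif a < b:
--             i = max(i + k + 1, j)
--             j = i + 1
--             k = 0
--         else:
--             j = j + k + 1
--             k = 0
--     return s[i:]
-- ===== Notes on version B (the rewrite author's own statement) =====
-- stated objective: alternative
-- what changed: A eliminates candidate starts by comparing with the current champion and rewinds the scan pointer back after every decision; B is the standard two-pointer maximum-suffix scan (LeetCode 1163) that keeps champion i and challenger j with a shared match length k and always advances j past the compared region in one forward pass.
import Mathlib
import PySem

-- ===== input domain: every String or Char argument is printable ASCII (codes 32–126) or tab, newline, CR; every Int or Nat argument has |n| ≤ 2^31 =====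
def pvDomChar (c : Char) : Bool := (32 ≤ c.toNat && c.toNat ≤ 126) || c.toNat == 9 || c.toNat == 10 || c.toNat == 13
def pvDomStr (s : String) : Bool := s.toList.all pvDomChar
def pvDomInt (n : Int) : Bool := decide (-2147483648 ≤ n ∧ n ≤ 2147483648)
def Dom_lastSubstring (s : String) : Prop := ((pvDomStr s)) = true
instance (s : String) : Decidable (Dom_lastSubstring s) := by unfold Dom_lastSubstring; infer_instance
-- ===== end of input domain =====

-- B replaces A's restart-and-rescan candidate elimination by the standard one-pass
-- two-pointer maximum-suffix scan (a different traversal, not claimed faster here).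

-- ===== PORT A =====

-- 'maxL' loop: for i in s: if i > maxL: maxL = i   (maxL initialised to 'a')
def pvMaxChar (l : List Char) : Char :=
  l.foldl (fun maxL c => if maxL < c then c else maxL) 'a'

-- second loop: for i in range(n): if s[i] == maxL: firstStart = i; break
def pvFindFirst (l : List Char) (m : Char) (j : Nat) : Option Nat :=
  match l with
  | [] => none
  | c :: t => if c = m then some j else pvFindFirst t m (j + 1)

-- the while loop of A, state (firstStart, secondStart, ind, i) exactly as in the Python;
-- the fuel argument only makes the backtracking loop total (the proofs below show
-- (n+2)^3 steps always suffice); s[...] is pyGetD, in range on every reachable state.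
def pvALoop (l : List Char) (m : Char) (n : Int) :
    Nat → Int → Int → Int → Int → Int
  | 0, f, _, _, _ => f
  | fuel + 1, f, sd, ind, i =>
    if i < n then
      if sd ≠ -1 then
        if PySem.List.pyGetD l (sd + ind) ' ' > PySem.List.pyGetD l (f + ind) ' ' then
          pvALoop l m n fuel sd (-1) 0 (sd + 1)
        else if PySem.List.pyGetD l (sd + ind) ' ' < PySem.List.pyGetD l (f + ind) ' ' then
          pvALoop l m n fuel f (-1) 0 (sd + 1)
        else
          pvALoop l m n fuel f sd (ind + 1) (i + 1)
      else if PySem.List.pyGetD l i ' ' = m then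
        pvALoop l m n fuel f i 1 (i + 1)
      else
        pvALoop l m n fuel f sd ind (i + 1)
    else f

def lastSubstring (s : String) : String :=
  match pvFindFirst s.toList (pvMaxChar s.toList) 0 with
  | none => ""   -- Python raises NameError here (firstStart unbound); excluded by Pre_
  | some f0 =>
    String.ofList (PySem.List.slice s.toList      -- s[firstStart:]
      (some (pvALoop s.toList (pvMaxChar s.toList) (s.toList.length : Int)
        ((s.toList.length + 2) ^ 3) (f0 : Int) (-1) 0 ((f0 : Int) + 1))) none)

-- ===== PORT B =====

-- the while loop of B, state (i, j, k) exactly as in Source B; the fuel argument only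
-- makes the loop total (the proofs below show (2n+4)(n+2) steps always suffice).
def pvBLoop (l : List Char) (n : Nat) : Nat → Nat → Nat → Nat → Nat
  | 0, i, _, _ => i
  | fuel + 1, i, j, k =>
    if j + k < n then
      let a := l.getD (i + k) ' '
      let b := l.getD (j + k) ' '
      if a = b then
        pvBLoop l n fuel i j (k + 1)
      else if a < b then
        let i' := max (i + k + 1) j
        pvBLoop l n fuel i' (i' + 1) 0
      else
        pvBLoop l n fuel i (j + k + 1) 0
    else i

def lastSubstring_alt (s : String) : String :=
  String.ofList (s.toList.drop
    (pvBLoop s.toList s.toList.length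
      ((2 * s.toList.length + 4) * (s.toList.length + 2)) 0 1 0))

-- ===== PRECONDITION & SPEC =====
-- Pre_ excludes exactly the strings with no character ≥ 'a' (incl. ""): on those A's
-- first scan never sets firstStart and the Python raises NameError; A returns on
-- every other string.
def Pre_lastSubstring (s : String) : Prop :=
  s.toList.any (fun c => decide ('a' ≤ c)) = true
instance (s : String) : Decidable (Pre_lastSubstring s) := by
  unfold Pre_lastSubstring; infer_instance
def pvWitness_lastSubstring : String := "b"

def Spec_lastSubstring (s : String) (out : String) : Prop := out = lastSubstring_alt s
instance (s : String) (out : String) : Decidable (Spec_lastSubstring s out) := by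
  unfold Spec_lastSubstring; infer_instance

-- ===== CLAIM (what is proved, stated in full; the proofs are below) =====
def Claim_equal_lastSubstring : Prop := ∀ (s : String), Dom_lastSubstring s →
  Pre_lastSubstring s → Spec_lastSubstring s (lastSubstring s)

-- ===== LEMMAS AND PROOFS =====

-- `IsBest l b`: the suffix of l starting at b is strictly (lexicographically: List `<`
-- on Char lists is exactly lexicographic order) greater than every other suffix.
def IsBest (l : List Char) (b : Nat) : Prop :=
  b < l.length ∧ ∀ p < l.length, p ≠ b → l.drop p < l.drop b

-- equal characters for k offsets, then a strictly smaller character ⇒ smaller suffix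
theorem lexDropMismatch (l : List Char) : ∀ (k x y : Nat),
    x + k < l.length → y + k < l.length →
    (∀ t < k, l.getD (x + t) ' ' = l.getD (y + t) ' ') →
    l.getD (x + k) ' ' < l.getD (y + k) ' ' →
    l.drop x < l.drop y := by
  intro k
  induction k with
  | zero =>
    intro x y hx hy _ hlt
    rw [List.drop_eq_getElem_cons (by omega : x < l.length),
        List.drop_eq_getElem_cons (by omega : y < l.length)]
    refine List.Lex.rel ?_
    rw [List.getD_eq_getElem l ' ' (by omega : x + 0 < l.length),
        List.getD_eq_getElem l ' ' (by omega : y + 0 < l.length)] at hlt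
    simpa using hlt
  | succ k ih =>
    intro x y hx hy hm hlt
    have hx0 : x < l.length := by omega
    have hy0 : y < l.length := by omega
    rw [List.drop_eq_getElem_cons hx0, List.drop_eq_getElem_cons hy0]
    have h0 : l[x] = l[y] := by
      have h := hm 0 (by omega)
      rw [List.getD_eq_getElem l ' ' (by omega : x + 0 < l.length),
          List.getD_eq_getElem l ' ' (by omega : y + 0 < l.length)] at h
      simpa using h
    rw [h0]
    refine List.Lex.cons ?_
    refine ih (x+1) (y+1) (by omega) (by omega) ?_ ?_
    · intro t ht
      have h := hm (t+1) (by omega)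
      rw [show x + (t+1) = x + 1 + t by omega, show y + (t+1) = y + 1 + t by omega] at h
      exact h
    · rw [show x + (k+1) = x + 1 + k by omega, show y + (k+1) = y + 1 + k by omega] at hlt
      exact hlt

theorem lexDropPrefixAux (l : List Char) : ∀ (d x y : Nat), l.length - y ≤ d → x < y →
    y < l.length →
    (∀ u, y + u < l.length → l.getD (y + u) ' ' = l.getD (x + u) ' ') →
    l.drop y < l.drop x := by
  intro d
  induction d with
  | zero => intro x y hd hxy hy _; omega
  | succ d ih =>
    intro x y hd hxy hy hm
    have hx : x < l.length := by omega
    rw [List.drop_eq_getElem_cons hy, List.drop_eq_getElem_cons hx]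
    have h0 : l[y] = l[x] := by
      have h := hm 0 (by omega)
      rw [List.getD_eq_getElem l ' ' (by omega : y + 0 < l.length),
          List.getD_eq_getElem l ' ' (by omega : x + 0 < l.length)] at h
      simpa using h
    rw [h0]
    refine List.Lex.cons ?_
    by_cases hy1 : y + 1 < l.length
    · refine ih (x+1) (y+1) (by omega) (by omega) hy1 ?_
      intro u hu
      have h := hm (u+1) (by omega)
      rw [show y + (u+1) = y + 1 + u by omega, show x + (u+1) = x + 1 + u by omega] at h
      exact h
    · rw [List.drop_eq_nil_of_le (by omega : l.length ≤ y + 1),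
          List.drop_eq_getElem_cons (by omega : x + 1 < l.length)]
      exact List.Lex.nil

-- the suffix at y is a proper prefix of the suffix at x (x < y) ⇒ smaller suffix
theorem lexDropPrefix (l : List Char) (x y : Nat) (hxy : x < y) (hy : y < l.length)
    (hm : ∀ u, y + u < l.length → l.getD (y + u) ' ' = l.getD (x + u) ' ') :
    l.drop y < l.drop x :=
  lexDropPrefixAux l (l.length - y) x y le_rfl hxy hy hm

theorem lexConsInv {a b : Char} {u v : List Char} (h : (a :: u) < (b :: v)) :
    a < b ∨ (a = b ∧ u < v) := by
  cases h with
  | rel h' => exact Or.inl h'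
  | cons h' => exact Or.inr ⟨rfl, h'⟩

-- ----- pvMaxChar computes an upper bound that is attained when some char ≥ 'a' -----
theorem pvFoldStep_acc_le : ∀ (l : List Char) (acc : Char),
    acc ≤ l.foldl (fun maxL c => if maxL < c then c else maxL) acc := by
  intro l
  induction l with
  | nil => intro acc; exact le_refl _
  | cons c t ih =>
    intro acc
    refine le_trans ?_ (ih (if acc < c then c else acc))
    split <;> [exact le_of_lt ‹acc < c›; exact le_refl _]

theorem pvFoldStep_le_of_mem : ∀ (l : List Char) (acc c : Char), c ∈ l →
    c ≤ l.foldl (fun maxL c => if maxL < c then c else maxL) acc := by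
  intro l
  induction l with
  | nil => intro acc c hc; cases hc
  | cons a t ih =>
    intro acc c hc
    rcases List.mem_cons.mp hc with rfl | hc
    · refine le_trans ?_ (pvFoldStep_acc_le t _)
      show c ≤ if acc < c then c else acc
      split <;> [exact le_refl _; exact le_of_not_gt ‹¬ acc < c›]
    · exact ih _ c hc

theorem pvFoldStep_mem_or : ∀ (l : List Char) (acc : Char),
    l.foldl (fun maxL c => if maxL < c then c else maxL) acc = acc ∨
    l.foldl (fun maxL c => if maxL < c then c else maxL) acc ∈ l := by
  intro l
  induction l with
  | nil => intro acc; exact Or.inl rfl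
  | cons a t ih =>
    intro acc
    rcases ih (if acc < a then a else acc) with h | h
    · rw [List.foldl_cons, h]
      split <;> [exact Or.inr (List.mem_cons_self); exact Or.inl rfl]
    · exact Or.inr (List.mem_cons_of_mem a h)

theorem pvMaxChar_le {l : List Char} {c : Char} (hc : c ∈ l) : c ≤ pvMaxChar l :=
  pvFoldStep_le_of_mem l 'a' c hc

theorem pvMaxChar_mem {l : List Char} (h : ∃ c ∈ l, 'a' ≤ c) : pvMaxChar l ∈ l := by
  obtain ⟨c, hc, hac⟩ := h
  rcases pvFoldStep_mem_or l 'a' with h' | h'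
  · have h1 : c ≤ pvMaxChar l := pvMaxChar_le hc
    have : c = 'a' := le_antisymm (h' ▸ h1) hac
    rw [show pvMaxChar l = c from h'.trans this.symm]
    exact hc
  · exact h'

-- the best suffix starts with the maximal character
theorem isBest_head {l : List Char} {b : Nat} (hB : IsBest l b)
    (h : ∃ c ∈ l, 'a' ≤ c) : l.getD b ' ' = pvMaxChar l := by
  obtain ⟨q, hq, hql⟩ := List.mem_iff_getElem.mp (pvMaxChar_mem h)
  rw [List.getD_eq_getElem l ' ' hB.1]
  refine le_antisymm (pvMaxChar_le (l.getElem_mem _)) ?_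
  by_cases hqb : q = b
  · subst hqb; rw [hql]
  · have hlex := hB.2 q hq hqb
    rw [List.drop_eq_getElem_cons hq, List.drop_eq_getElem_cons hB.1] at hlex
    rcases lexConsInv hlex with h' | ⟨h', _⟩
    · rw [← hql]; exact le_of_lt h'
    · rw [← hql, h']

-- ----- pvFindFirst finds the first occurrence -----
theorem pvFindFirst_spec (m : Char) : ∀ (l : List Char) (j : Nat), m ∈ l →
    ∃ r < l.length, pvFindFirst l m j = some (j + r) ∧ l.getD r ' ' = m ∧
      ∀ p < r, l.getD p ' ' ≠ m := by
  intro l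
  induction l with
  | nil => intro j h; cases h
  | cons c t ih =>
    intro j hm
    by_cases hc : c = m
    · exact ⟨0, by simp, by simp [pvFindFirst, hc], by simpa using hc, by omega⟩
    · have hmt : m ∈ t := by
        rcases List.mem_cons.mp hm with rfl | h
        · exact absurd rfl hc
        · exact h
      obtain ⟨r, hr, hfind, hget, hmin⟩ := ih (j+1) hmt
      refine ⟨r + 1, by simpa using Nat.add_lt_add_right hr 1, ?_, by simpa using hget, ?_⟩
      · rw [show pvFindFirst (c :: t) m j = pvFindFirst t m (j+1) by simp [pvFindFirst, hc],
            hfind]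
        congr 1; omega
      · intro p hp
        match p with
        | 0 => simpa using hc
        | p + 1 => simpa using hmin p (by omega)

-- ----- the best index exists and is unique -----
theorem isBest_exists_aux (l : List Char) : ∀ (k : Nat), k < l.length →
    ∃ b ≤ k, ∀ p ≤ k, p ≠ b → l.drop p < l.drop b := by
  intro k
  induction k with
  | zero => exact fun _ => ⟨0, le_refl _, by omega⟩
  | succ k ih =>
    intro hk1
    obtain ⟨b, hb, hbest⟩ := ih (by omega)
    have hne : l.drop (k+1) ≠ l.drop b := by
      intro he
      have := congrArg List.length he
      rw [List.length_drop, List.length_drop] at this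
      omega
    rcases lt_trichotomy (l.drop (k+1)) (l.drop b) with hlt | heq | hgt
    · refine ⟨b, by omega, ?_⟩
      intro p hp hpb
      rcases Nat.lt_or_ge p (k+1) with h | h
      · exact hbest p (by omega) hpb
      · rw [show p = k + 1 by omega]; exact hlt
    · exact absurd heq hne
    · refine ⟨k+1, le_refl _, ?_⟩
      intro p hp hpk
      by_cases hpb : p = b
      · subst hpb; exact hgt
      · exact lt_trans (hbest p (by omega) hpb) hgt

theorem isBest_exists (l : List Char) (hl : l ≠ []) : ∃ b, IsBest l b := by
  have hn : 0 < l.length := List.length_pos_of_ne_nil hl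
  obtain ⟨b, hb, hbest⟩ := isBest_exists_aux l (l.length - 1) (by omega)
  exact ⟨b, by omega, fun p hp hpb => hbest p (by omega) hpb⟩

theorem pvMeasureLt (A1 A2 B1 B2 C : Nat) (hA : A2 < A1) (hB : B2 < C) :
    A2 * C + B2 < A1 * C + B1 :=
  calc A2 * C + B2 < A2 * C + C := by omega
    _ = (A2 + 1) * C := by ring
    _ ≤ A1 * C := Nat.mul_le_mul_right C hA
    _ ≤ A1 * C + B1 := Nat.le_add_right _ _

-- ----- correctness of B's loop: it returns the best index -----
theorem pvBLoop_correct (l : List Char) (B : Nat) (hB : IsBest l B) :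
    ∀ (N i j k : Nat),
      (2 * l.length + 4 - (i + j)) * (l.length + 2) + (l.length + 1 - (j + k)) < N →
      i < j → (B = i ∨ j ≤ B) →
      (∀ t < k, j + t < l.length ∧ l.getD (i + t) ' ' = l.getD (j + t) ' ') →
      pvBLoop l l.length N i j k = B := by
  intro N
  induction N with
  | zero => omega
  | succ N ih =>
    intro i j k hμ hij hpos hmatch
    rw [pvBLoop]
    by_cases hg : j + k < l.length
    · rw [if_pos hg]
      have hik : i + k < l.length := by omega
      by_cases heq : l.getD (i + k) ' ' = l.getD (j + k) ' '
      · rw [if_pos heq]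
        refine ih i j (k+1) (by omega) hij hpos ?_
        intro t ht
        rcases Nat.lt_or_ge t k with h | h
        · exact hmatch t h
        · have : t = k := by omega
          subst this
          exact ⟨hg, heq⟩
      · rw [if_neg heq]
        by_cases hlt : l.getD (i + k) ' ' < l.getD (j + k) ' '
        · rw [if_pos hlt]
          -- champion i loses: every start below max(i+k+1, j) is beaten
          have hBnei : B ≠ i := by
            intro hBi
            have h1 : l.drop i < l.drop j :=
              lexDropMismatch l k i j hik hg (fun t ht => (hmatch t ht).2) hlt
            have h2 : l.drop j < l.drop B := hB.2 j (by omega) (by omega)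
            rw [hBi] at h2
            exact asymm h1 h2
          have hjB : j ≤ B := hpos.elim (fun h => absurd h.symm (by omega)) id
          have hBg : i + k + 1 ≤ B := by
            by_contra hcon
            have ht : B - i ≤ k := by omega
            set t := B - i with hti
            have h1 : l.drop B < l.drop (j + t) := by
              refine lexDropMismatch l (k - t) B (j + t) (by omega) (by omega) ?_ ?_
              · intro u hu
                have h := (hmatch (t + u) (by omega)).2
                rw [show i + (t + u) = B + u by omega,
                    show j + (t + u) = j + t + u by omega] at h
                exact h
              · have h : l.getD (i + k) ' ' < l.getD (j + k) ' ' := hlt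
                rw [show i + k = B + (k - t) by omega,
                    show j + k = j + t + (k - t) by omega] at h
                exact h
            have h2 : l.drop (j + t) < l.drop B := hB.2 (j + t) (by omega) (by omega)
            exact asymm h1 h2
          refine ih (max (i+k+1) j) (max (i+k+1) j + 1) 0 ?_ (by omega) (by omega) (by omega)
          have hm1 : i + k + 1 ≤ max (i+k+1) j := le_max_left _ _
          have hm2 : j ≤ max (i+k+1) j := le_max_right _ _
          have hm3 : max (i+k+1) j ≤ l.length := by omega
          calc (2 * l.length + 4 - (max (i+k+1) j + (max (i+k+1) j + 1))) * (l.length + 2)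
                + (l.length + 1 - (max (i+k+1) j + 1 + 0))
              < (2 * l.length + 4 - (i + j)) * (l.length + 2) + (l.length + 1 - (j + k)) :=
                pvMeasureLt _ _ _ _ _ (by omega) (by omega)
            _ ≤ N := by omega
        · rw [if_neg hlt]
          -- challenger j loses: starts j..j+k are beaten
          have hba : l.getD (j + k) ' ' < l.getD (i + k) ' ' :=
            lt_of_le_of_ne (le_of_not_gt hlt) (fun h => heq h.symm)
          have hpos' : B = i ∨ j + k + 1 ≤ B := by
            rcases hpos with h | h
            · exact Or.inl h
            · right
              by_contra hcon
              have ht : B - j ≤ k := by omega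
              set t := B - j with hti
              have h1 : l.drop B < l.drop (i + t) := by
                refine lexDropMismatch l (k - t) B (i + t) (by omega) (by omega) ?_ ?_
                · intro u hu
                  have hh := (hmatch (t + u) (by omega)).2
                  rw [show i + (t + u) = i + t + u by omega,
                      show j + (t + u) = B + u by omega] at hh
                  exact hh.symm
                · have hh := hba
                  rw [show j + k = B + (k - t) by omega,
                      show i + k = i + t + (k - t) by omega] at hh
                  exact hh
              have h2 : l.drop (i + t) < l.drop B := hB.2 (i + t) (by omega) (by omega)
              exact asymm h1 h2
          refine ih i (j + k + 1) 0 ?_ (by omega) hpos' (by omega)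
          calc (2 * l.length + 4 - (i + (j + k + 1))) * (l.length + 2)
                + (l.length + 1 - (j + k + 1 + 0))
              < (2 * l.length + 4 - (i + j)) * (l.length + 2) + (l.length + 1 - (j + k)) :=
                pvMeasureLt _ _ _ _ _ (by omega) (by omega)
            _ ≤ N := by omega
    · rw [if_neg hg]
      -- exit: j + k ≥ n and the matched challenger region is a proper prefix of i's suffix
      have hjk : l.length ≤ j + k := by omega
      rcases hpos with h | h
      · omega
      · exfalso
        have hBn : B < l.length := hB.1
        set t := B - j with hti
        have h1 : l.drop B < l.drop (i + t) := by
          refine lexDropPrefix l (i + t) B (by omega) hBn ?_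
          intro u hu
          have hh := (hmatch (t + u) (by omega)).2
          rw [show i + (t + u) = i + t + u by omega,
              show j + (t + u) = B + u by omega] at hh
          exact hh.symm
        have h2 : l.drop (i + t) < l.drop B := hB.2 (i + t) (by omega) (by omega)
        exact asymm h1 h2

-- ----- correctness of A's loop -----
def pvμA (n : Nat) (f sd i : Int) : Nat :=
  if sd = -1 then
    ((n : Int) + 1 - f).toNat * ((n + 2) * (n + 2)) + ((n : Int) - i).toNat * (n + 2) + (n + 1)
  else
    ((n : Int) + 1 - f).toNat * ((n + 2) * (n + 2)) + ((n : Int) - sd).toNat * (n + 2) +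
      ((n : Int) - i).toNat

def InvA (l : List Char) (B : Nat) (m : Char) (f sd ind i : Int) : Prop :=
  0 ≤ f ∧ f < (l.length : Int) ∧ l.getD f.toNat ' ' = m ∧
  ((sd = -1 ∧ f < i ∧ ((B : Int) = f ∨ i ≤ (B : Int)))
   ∨ (0 ≤ sd ∧ f < sd ∧ 1 ≤ ind ∧ i = sd + ind ∧ ((B : Int) = f ∨ sd ≤ (B : Int)) ∧
      ∀ t : Nat, (t : Int) < ind → l.getD (f.toNat + t) ' ' = l.getD (sd.toNat + t) ' '))

theorem pvMeasureLt2 (A B1 B2 C1 C2 K : Nat) (hB : B2 < B1) (hC : C2 < K) :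
    A + B2 * K + C2 < A + B1 * K + C1 := by
  have : B2 * K + C2 < B1 * K := calc
    B2 * K + C2 < B2 * K + K := by omega
    _ = (B2 + 1) * K := by ring
    _ ≤ B1 * K := Nat.mul_le_mul_right K hB
  omega

theorem pvMeasureLt3 (A1 A2 B1 B2 C1 C2 K : Nat) (hA : A2 < A1) (hB : B2 < K) (hC : C2 < K) :
    A2 * (K * K) + B2 * K + C2 < A1 * (K * K) + B1 * K + C1 := by
  have h1 : B2 * K + C2 < K * K := calc
    B2 * K + C2 < B2 * K + K := by omega
    _ = (B2 + 1) * K := by ring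
    _ ≤ K * K := Nat.mul_le_mul_right K hB
  have h2 : A2 * (K * K) + K * K ≤ A1 * (K * K) := by
    calc A2 * (K * K) + K * K = (A2 + 1) * (K * K) := by ring
      _ ≤ A1 * (K * K) := Nat.mul_le_mul_right _ hA
  omega

theorem pvALoop_correct (l : List Char) (B : Nat) (m : Char) (hB : IsBest l B)
    (hBm : l.getD B ' ' = m) :
    ∀ (fuel : Nat) (f sd ind i : Int),
      InvA l B m f sd ind i →
      pvμA l.length f sd i < fuel →
      pvALoop l m (l.length : Int) fuel f sd ind i = (B : Int) := by
  intro fuel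
  induction fuel with
  | zero => intro f sd ind i _ hμ; omega
  | succ N ih =>
    intro f sd ind i hInv hμ
    obtain ⟨h0f, hfn, hfm, hcase⟩ := hInv
    obtain ⟨F, rfl⟩ : ∃ F : Nat, f = (F : Int) := ⟨f.toNat, (Int.toNat_of_nonneg h0f).symm⟩
    rw [Int.toNat_natCast] at hfm
    have hFn : F < l.length := by exact_mod_cast hfn
    have hBn : B < l.length := hB.1
    rcases hcase with ⟨rfl, hfi, hpos⟩ | ⟨h0sd, hfsd, h1ind, rfl, hpos, hmatch⟩
    · -- scanning state: sd = -1
      obtain ⟨I, rfl⟩ : ∃ I : Nat, i = (I : Int) :=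
        ⟨i.toNat, (Int.toNat_of_nonneg (by omega)).symm⟩
      have hFI : F < I := by exact_mod_cast hfi
      rw [pvALoop]
      by_cases hin : I < l.length
      · rw [if_pos (by exact_mod_cast hin), if_neg (by simp)]
        rw [PySem.List.pyGetD_natCast]
        by_cases hIm : l.getD I ' ' = m
        · rw [if_pos hIm]
          refine ih (F : Int) (I : Int) 1 ((I : Int) + 1) ?_ ?_
          · refine ⟨by omega, by omega, by simpa using hfm,
              Or.inr ⟨by omega, by omega, by omega, by omega, hpos, ?_⟩⟩
            intro t ht
            have ht0 : t = 0 := by omega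
            subst ht0
            simp only [Int.toNat_natCast, Nat.add_zero]
            rw [hfm, hIm]
          · have hlt : pvμA l.length (F : Int) (I : Int) ((I : Int) + 1) <
                pvμA l.length (F : Int) (-1) (I : Int) := by
              unfold pvμA
              rw [if_neg (by omega), if_pos rfl]
              have : (((l.length : Int)) - ((I : Int) + 1)).toNat < l.length + 1 := by omega
              omega
            omega
        · rw [if_neg hIm]
          refine ih (F : Int) (-1) ind ((I : Int) + 1) ?_ ?_
          · refine ⟨by omega, by omega, by simpa using hfm, Or.inl ⟨rfl, by omega, ?_⟩⟩
            have hBI : B ≠ I := by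
              intro h
              rw [h] at hBm
              exact hIm hBm
            rcases hpos with h | h
            · exact Or.inl h
            · right
              have : I ≤ B := by exact_mod_cast h
              have : I < B := by omega
              exact_mod_cast this
          · have hlt : pvμA l.length (F : Int) (-1) ((I : Int) + 1) <
                pvμA l.length (F : Int) (-1) (I : Int) := by
              unfold pvμA
              rw [if_pos rfl, if_pos rfl]
              refine pvMeasureLt2 _ _ _ _ _ _ (by omega) (by omega)
            omega
      · rw [if_neg (by exact_mod_cast hin)]
        have : F = B := by
          rcases hpos with h | h
          · exact_mod_cast h.symm
          · exfalso
            have : I ≤ B := by exact_mod_cast h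
            omega
        rw [this]
    · -- comparing state: sd = SD ≥ 0, i = SD + IND
      obtain ⟨SD, rfl⟩ : ∃ S : Nat, sd = (S : Int) := ⟨sd.toNat, (Int.toNat_of_nonneg h0sd).symm⟩
      obtain ⟨IND, rfl⟩ : ∃ K : Nat, ind = (K : Int) :=
        ⟨ind.toNat, (Int.toNat_of_nonneg (by omega)).symm⟩
      simp only [Int.toNat_natCast] at hmatch
      have hFSD : F < SD := by exact_mod_cast hfsd
      have h1IND : 1 ≤ IND := by exact_mod_cast h1ind
      have hmatchN : ∀ t < IND, l.getD (F + t) ' ' = l.getD (SD + t) ' ' := by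
        intro t ht
        exact hmatch t (by exact_mod_cast ht)
      have hcast : ((SD : Int) + (IND : Int)) = ((SD + IND : Nat) : Int) := by push_cast; ring
      rw [hcast] at hμ ⊢
      rw [pvALoop]
      by_cases hin : SD + IND < l.length
      · rw [if_pos (by exact_mod_cast hin), if_pos (by omega)]
        rw [show ((SD : Int) + (IND : Int)) = ((SD + IND : Nat) : Int) by push_cast; ring,
            show ((F : Int) + (IND : Int)) = ((F + IND : Nat) : Int) by push_cast; ring,
            PySem.List.pyGetD_natCast, PySem.List.pyGetD_natCast]
        have hFIn : F + IND < l.length := by omega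
        by_cases hgt : l.getD (F + IND) ' ' < l.getD (SD + IND) ' '
        · -- the challenger wins: switch champion, restart the scan behind it
          rw [if_pos hgt]
          have hds : l.drop F < l.drop SD :=
            lexDropMismatch l IND F SD hFIn hin hmatchN hgt
          have hBF : B ≠ F := by
            intro h
            have h2 : l.drop SD < l.drop B := hB.2 SD (by omega) (by omega)
            rw [h] at h2
            exact asymm hds h2
          have hSDB : SD ≤ B := by
            rcases hpos with h | h
            · exfalso; exact hBF (by exact_mod_cast h)
            · exact_mod_cast h
          have hSDm : l.getD SD ' ' = m := by
            have h0 := hmatchN 0 (by omega)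
            rw [Nat.add_zero, Nat.add_zero] at h0
            rw [← h0]; exact hfm
          refine ih (SD : Int) (-1) 0 ((SD : Int) + 1) ?_ ?_
          · exact ⟨by omega, by omega, by simpa using hSDm, Or.inl ⟨rfl, by omega, by omega⟩⟩
          · have hlt : pvμA l.length (SD : Int) (-1) ((SD : Int) + 1) <
                pvμA l.length (F : Int) (SD : Int) ((SD + IND : Nat) : Int) := by
              unfold pvμA
              rw [if_pos rfl, if_neg (by omega)]
              refine pvMeasureLt3 _ _ _ _ _ _ _ (by omega) (by omega) (by omega)
            omega
        · rw [if_neg hgt]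
          by_cases hlt2 : l.getD (SD + IND) ' ' < l.getD (F + IND) ' '
          · -- the challenger loses: discard it, rescan from just after it
            rw [if_pos hlt2]
            have hds : l.drop SD < l.drop F := by
              refine lexDropMismatch l IND SD F hin hFIn ?_ hlt2
              intro t ht
              exact (hmatchN t ht).symm
            have hBSD : B ≠ SD := by
              intro h
              have h2 : l.drop F < l.drop B := hB.2 F (by omega) (by omega)
              rw [h] at h2
              exact asymm hds h2
            refine ih (F : Int) (-1) 0 ((SD : Int) + 1) ?_ ?_
            · refine ⟨by omega, by omega, by simpa using hfm, Or.inl ⟨rfl, by omega, ?_⟩⟩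
              rcases hpos with h | h
              · exact Or.inl h
              · right
                have : SD ≤ B := by exact_mod_cast h
                have : SD < B := by omega
                exact_mod_cast this
            · have hlt : pvμA l.length (F : Int) (-1) ((SD : Int) + 1) <
                  pvμA l.length (F : Int) (SD : Int) ((SD + IND : Nat) : Int) := by
                unfold pvμA
                rw [if_pos rfl, if_neg (by omega)]
                refine pvMeasureLt2 _ _ _ _ _ _ (by omega) (by omega)
              omega
          · -- equal characters: extend the matched region
            rw [if_neg hlt2]
            have heqc : l.getD (F + IND) ' ' = l.getD (SD + IND) ' ' :=
              le_antisymm (le_of_not_gt hlt2) (le_of_not_gt hgt)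
            refine ih (F : Int) (SD : Int) ((IND : Int) + 1) (((SD + IND : Nat) : Int) + 1) ?_ ?_
            · refine ⟨by omega, by omega, by simpa using hfm,
                Or.inr ⟨by omega, by omega, by omega, by push_cast; ring, hpos, ?_⟩⟩
              intro t ht
              simp only [Int.toNat_natCast]
              have htn : t ≤ IND := by exact_mod_cast Int.lt_add_one_iff.mp ht
              rcases Nat.lt_or_ge t IND with h | h
              · exact hmatchN t h
              · have : t = IND := by omega
                subst this
                exact heqc
            · have hlt : pvμA l.length (F : Int) (SD : Int) (((SD + IND : Nat) : Int) + 1) <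
                  pvμA l.length (F : Int) (SD : Int) (((SD + IND : Nat) : Int)) := by
                unfold pvμA
                rw [if_neg (by omega), if_neg (by omega)]
                have : (((l.length : Int)) - (((SD + IND : Nat) : Int) + 1)).toNat <
                    (((l.length : Int)) - ((SD + IND : Nat) : Int)).toNat := by omega
                omega
              omega
      · -- loop exit while comparing: the challenger's suffix is a proper prefix of f's
        rw [if_neg (by exact_mod_cast hin)]
        rcases hpos with h | h
        · have : F = B := by exact_mod_cast h.symm
          rw [this]
        · exfalso
          have hSDB : SD ≤ B := by exact_mod_cast h
          set t := B - SD with hti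
          have h1 : l.drop B < l.drop (F + t) := by
            refine lexDropPrefix l (F + t) B (by omega) hBn ?_
            intro u hu
            have hh := hmatchN (t + u) (by omega)
            rw [show F + (t + u) = F + t + u by omega,
                show SD + (t + u) = B + u by omega] at hh
            exact hh.symm
          have h2 : l.drop (F + t) < l.drop B := hB.2 (F + t) (by omega) (by omega)
          exact asymm h1 h2

-- the initial fuel (n+2)^3 dominates the measure of the initial state
theorem pvFuel (n f0 : Nat) (hf : f0 < n) :
    pvμA n (f0 : Int) (-1) ((f0 : Int) + 1) < (n + 2) ^ 3 := by
  unfold pvμA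
  rw [if_pos rfl]
  have h1 : ((n : Int) + 1 - (f0 : Int)).toNat ≤ n + 1 := by omega
  have h2 : ((n : Int) - ((f0 : Int) + 1)).toNat ≤ n + 1 := by omega
  calc ((n : Int) + 1 - (f0 : Int)).toNat * ((n + 2) * (n + 2)) +
        ((n : Int) - ((f0 : Int) + 1)).toNat * (n + 2) + (n + 1)
      ≤ (n + 1) * ((n + 2) * (n + 2)) + (n + 1) * (n + 2) + (n + 1) :=
        Nat.add_le_add (Nat.add_le_add (Nat.mul_le_mul_right _ h1)
          (Nat.mul_le_mul_right _ h2)) le_rfl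
    _ < (n + 2) ^ 3 := by nlinarith

-- ===== VERDICT (by name: the statement is the Claim_ definition above) =====
theorem lastSubstring_spec : Claim_equal_lastSubstring := by
  intro s _ hpre
  unfold Spec_lastSubstring
  set l := s.toList with hl
  have hpre' : ∃ c ∈ l, 'a' ≤ c := by
    unfold Pre_lastSubstring at hpre
    rw [List.any_eq_true] at hpre
    obtain ⟨c, hc, hd⟩ := hpre
    exact ⟨c, hc, of_decide_eq_true hd⟩
  have hlne : l ≠ [] := by
    obtain ⟨c, hc, _⟩ := hpre'
    exact List.ne_nil_of_mem hc
  obtain ⟨B, hB⟩ := isBest_exists l hlne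
  have hBm : l.getD B ' ' = pvMaxChar l := isBest_head hB hpre'
  obtain ⟨f0, hf0n, hfind, hf0get, hf0min⟩ :=
    pvFindFirst_spec (pvMaxChar l) l 0 (pvMaxChar_mem hpre')
  rw [Nat.zero_add] at hfind
  -- A returns the best suffix
  have hA : lastSubstring s = String.ofList (l.drop B) := by
    unfold lastSubstring
    rw [← hl, hfind]
    dsimp only
    have hloop : pvALoop l (pvMaxChar l) (l.length : Int) ((l.length + 2) ^ 3)
        (f0 : Int) (-1) 0 ((f0 : Int) + 1) = (B : Int) := by
      refine pvALoop_correct l B (pvMaxChar l) hB hBm _ _ _ _ _ ?_ (pvFuel _ _ hf0n)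
      refine ⟨by omega, by omega, by simpa using hf0get, Or.inl ⟨rfl, by omega, ?_⟩⟩
      have hf0B : f0 ≤ B := by
        by_contra hcon
        exact hf0min B (by omega) hBm
      rcases Nat.eq_or_lt_of_le hf0B with h | h
      · left; exact_mod_cast h.symm
      · right; exact_mod_cast h
    rw [hloop, PySem.List.slice_from_natCast]
  -- B returns the best suffix
  have hAlt : lastSubstring_alt s = String.ofList (l.drop B) := by
    unfold lastSubstring_alt
    rw [← hl]
    have hloop : pvBLoop l l.length ((2 * l.length + 4) * (l.length + 2)) 0 1 0 = B := by
      refine pvBLoop_correct l B hB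
        ((2 * l.length + 4) * (l.length + 2)) 0 1 0
        ?_ (by omega) (by omega) (by omega)
      have h1 : (2 * l.length + 4 - (0 + 1)) * (l.length + 2) ≤
          (2 * l.length + 3) * (l.length + 2) := Nat.mul_le_mul_right _ (by omega)
      have h2 : (2 * l.length + 3) * (l.length + 2) + (l.length + 2) =
          (2 * l.length + 4) * (l.length + 2) := by ring
      omega
    rw [hloop]
  rw [hA, hAlt]
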